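-- pv_equiv track=rewrite | github.com/justdoths-dev/trading-bot | src/research/diagnostics/selected_strategy_edge_candidate_paper_replay_watchlist_observation_retention_report.py | best_watchlist_priority
-- ===== SOURCE A (Python) =====
-- from typing import Any, Sequence
--
-- def best_watchlist_priority(source_watchlist_priorities: Sequence[str]) -> str | None:
--     priority_order = {"high": 0, "medium": 1, "low": 2}
--     priorities = [
--         priority
--         for priority in source_watchlist_priorities
--         if priority in priority_order
--     ]
--     if not priorities:
--         return _first_value(source_watchlist_priorities)
--     return sorted(priorities, key=lambda priority: priority_order[priority])[0]
--
-- def _first_value(values: Sequence[str]) -> str | None: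
--     for value in values:
--         clean = _clean_text(value)
--         if clean:
--             return clean
--     return None
--
-- def _clean_text(value: Any) -> str:
--     if value is None:
--         return ""
--     return str(value).strip()
-- ===== SOURCE B (Python) =====
-- from typing import Any, Sequence
--
-- def best_watchlist_priority(source_watchlist_priorities: Sequence[str]) -> str | None:
--     for label in ("high", "medium", "low"):
--         if label in source_watchlist_priorities:
--             return label
--     return _first_value(source_watchlist_priorities)
--
-- def _first_value(values: Sequence[str]) -> str | None:
--     for value in values:
--         clean = _clean_text(value)
--         if clean:
--             return clean
--     return None
--
-- def _clean_text(value: Any) -> str: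
--     if value is None:
--         return ""
--     return str(value).strip()
-- ===== Notes on version B (the rewrite author's own statement) =====
-- stated objective: simpler
-- what changed: Replaced the filter+sort over the input by a direct scan of the three priority labels in rank order, returning the first label present in the input; the fallback _first_value is unchanged.
import Mathlib
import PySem

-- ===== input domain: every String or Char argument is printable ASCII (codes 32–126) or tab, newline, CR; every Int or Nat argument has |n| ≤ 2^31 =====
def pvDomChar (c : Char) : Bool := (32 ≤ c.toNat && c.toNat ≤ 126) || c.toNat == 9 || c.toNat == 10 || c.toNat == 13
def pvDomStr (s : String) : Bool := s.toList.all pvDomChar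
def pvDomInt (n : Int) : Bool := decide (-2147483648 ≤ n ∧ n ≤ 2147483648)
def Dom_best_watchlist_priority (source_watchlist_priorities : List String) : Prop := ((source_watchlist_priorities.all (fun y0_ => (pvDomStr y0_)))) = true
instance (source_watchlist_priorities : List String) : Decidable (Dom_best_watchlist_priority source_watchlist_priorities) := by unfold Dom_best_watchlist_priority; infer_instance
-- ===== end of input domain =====

-- B replaces A's filter+sort by a direct scan of the three labels in rank order (objective: simpler).

-- shared helpers (_clean_text and _first_value are identical in A and B)
def pv_clean_text (value : String) : String :=
  -- the `value is None` branch cannot fire for a String argument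
  PySem.Str.strip value

def pv_first_value : List String → Option String
  | [] => none
  | value :: rest =>
    let clean := pv_clean_text value
    if clean ≠ "" then some clean else pv_first_value rest

-- ===== PORT A =====
def pv_priority_order : PySem.Dict String Int :=
  PySem.Dict.mk [("high", 0), ("medium", 1), ("low", 2)]

def best_watchlist_priority (source_watchlist_priorities : List String) : Option String :=
  let priorities := source_watchlist_priorities.filter (fun p => pv_priority_order.contains p)
  if priorities = [] then
    pv_first_value source_watchlist_priorities
  else
    -- sorted(priorities, key=…)[0] : index 0 of a non-empty list, hence head?
    (PySem.List.sorted priorities (fun p => pv_priority_order.getD p 3) false).head?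

-- ===== PORT B =====
def best_watchlist_priority_alt (source_watchlist_priorities : List String) : Option String :=
  if "high" ∈ source_watchlist_priorities then some "high"
  else if "medium" ∈ source_watchlist_priorities then some "medium"
  else if "low" ∈ source_watchlist_priorities then some "low"
  else pv_first_value source_watchlist_priorities

-- ===== PRECONDITION & SPEC =====
def Spec_best_watchlist_priority (source_watchlist_priorities : List String) (out : Option String) : Prop := out = best_watchlist_priority_alt source_watchlist_priorities
instance (source_watchlist_priorities : List String) (out : Option String) : Decidable (Spec_best_watchlist_priority source_watchlist_priorities out) := by unfold Spec_best_watchlist_priority; infer_instance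

-- ===== CLAIM (what is proved, stated in full; the proofs are below) =====
def Claim_equal_best_watchlist_priority : Prop := ∀ (source_watchlist_priorities : List String), Dom_best_watchlist_priority source_watchlist_priorities → Spec_best_watchlist_priority source_watchlist_priorities (best_watchlist_priority source_watchlist_priorities)

-- ===== LEMMAS AND PROOFS =====

lemma pv_contains_iff (p : String) :
    pv_priority_order.contains p = true ↔ p = "high" ∨ p = "medium" ∨ p = "low" := by
  constructor
  · intro h
    simp [pv_priority_order, PySem.Dict.contains_mk] at h
    rcases h with h | h | h
    · exact Or.inl h.symm
    · exact Or.inr (Or.inl h.symm)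
    · exact Or.inr (Or.inr h.symm)
  · rintro (rfl | rfl | rfl) <;> decide

lemma pv_mem_filter_labels {l : List String} {p : String}
    (h : p ∈ l.filter (fun q => pv_priority_order.contains q)) :
    p ∈ l ∧ (p = "high" ∨ p = "medium" ∨ p = "low") := by
  rw [List.mem_filter] at h
  exact ⟨h.1, (pv_contains_iff p).1 h.2⟩

lemma pv_filter_mem {l : List String} {p : String}
    (hp : p ∈ l) (hlab : p = "high" ∨ p = "medium" ∨ p = "low") :
    p ∈ l.filter (fun q => pv_priority_order.contains q) := by
  rw [List.mem_filter]
  exact ⟨hp, (pv_contains_iff p).2 hlab⟩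

-- ===== VERDICT (by name: the statement is the Claim_ definition above) =====
theorem best_watchlist_priority_spec : Claim_equal_best_watchlist_priority := by
  intro l _
  show best_watchlist_priority l = best_watchlist_priority_alt l
  unfold best_watchlist_priority best_watchlist_priority_alt
  set P := l.filter (fun q => pv_priority_order.contains q) with hP
  set key : String → Int := fun p => pv_priority_order.getD p 3 with hkey
  by_cases hempty : P = []
  · -- no label occurs in l: both sides fall back to pv_first_value
    have hh : "high" ∉ l := fun h => by
      have := pv_filter_mem h (Or.inl rfl); rw [← hP, hempty] at this; simp at this
    have hm : "medium" ∉ l := fun h => by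
      have := pv_filter_mem h (Or.inr (Or.inl rfl)); rw [← hP, hempty] at this; simp at this
    have hl : "low" ∉ l := fun h => by
      have := pv_filter_mem h (Or.inr (Or.inr rfl)); rw [← hP, hempty] at this; simp at this
    simp [hempty, hh, hm, hl]
  · -- some label occurs: head of the sorted filtered list is the best label
    cases hs : PySem.List.sorted P key false with
    | nil => exact absurd ((PySem.List.sorted_eq_nil_iff P key false).mp hs) hempty
    | cons m t =>
      have hmin : ∀ y ∈ P, key m ≤ key y := PySem.List.key_head_sorted_le P key hs
      have hmP : m ∈ P := by
        have : m ∈ PySem.List.sorted P key false := by rw [hs]; exact List.mem_cons_self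
        exact (PySem.List.mem_sorted P key false m).mp this
      obtain ⟨hml, hmlab⟩ := pv_mem_filter_labels hmP
      by_cases h1 : "high" ∈ l
      · have h1P : "high" ∈ P := pv_filter_mem h1 (Or.inl rfl)
        have hle := hmin _ h1P
        have hm_eq : m = "high" := by
          rcases hmlab with rfl | rfl | rfl
          · rfl
          all_goals (exfalso; revert hle; decide)
        simp [hempty, hs, h1, hm_eq]
      · by_cases h2 : "medium" ∈ l
        · have h2P : "medium" ∈ P := pv_filter_mem h2 (Or.inr (Or.inl rfl))
          have hle := hmin _ h2P
          have hm_eq : m = "medium" := by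
            rcases hmlab with rfl | rfl | rfl
            · exact absurd hml h1
            · rfl
            · exfalso; revert hle; decide
          simp [hempty, hs, h1, h2, hm_eq]
        · have hm_eq : m = "low" := by
            rcases hmlab with rfl | rfl | rfl
            · exact absurd hml h1
            · exact absurd hml h2
            · rfl
          have h3 : "low" ∈ l := hm_eq ▸ hml
          simp [hempty, hs, h1, h2, h3, hm_eq]
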